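-- pv_equiv track=rewrite | github.com/cywong-arch/smart-contract-vul-detect | src/detectors/bytecode_denial_of_service_detector.py | _has_termination_condition
-- ===== SOURCE A (Python) =====
-- from typing import List, Dict, Any
--
-- def _has_termination_condition(loop_opcodes: List[Dict]) -> bool:
--     """Check if loop has a clear termination condition."""
--     # Look for comparison operations followed by conditional jumps
--     # This indicates a termination condition
--
--     for i, op in enumerate(loop_opcodes):
--         # Look for: comparison -> JUMPI pattern
--         if op["name"] in ["LT", "GT", "EQ", "ISZERO"]:
--             # Check if followed by JUMPI
--             if i + 1 < len(loop_opcodes) and loop_opcodes[i + 1]["name"] == "JUMPI":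
--                 # Check if there's a RETURN/STOP after the jump (exit condition)
--                 for j in range(i + 2, min(i + 20, len(loop_opcodes))):
--                     if loop_opcodes[j]["name"] in ["RETURN", "STOP", "REVERT"]:
--                         return True
--
--     # Also check for counter-based loops (PUSH -> ADD/SUB -> comparison)
--     for i in range(len(loop_opcodes) - 5):
--         if (loop_opcodes[i]["name"].startswith("PUSH") and
--             loop_opcodes[i+1]["name"] in ["ADD", "SUB"] and
--             loop_opcodes[i+2]["name"] in ["LT", "GT", "EQ"] and
--             loop_opcodes[i+3]["name"] == "JUMPI"):
--             return True
--
--     return False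
-- ===== SOURCE B (Python) =====
-- EXITS = ("RETURN", "STOP", "REVERT")
--
--
-- def _has_termination_condition(loop_opcodes):
--     """Precompute a next-exit suffix table, then scan once; no 20-wide inner rescan."""
--     names = [op["name"] for op in loop_opcodes]
--     n = len(names)
--     # suffix[j] = smallest index k >= j with names[k] an exit opcode, else n;
--     # built back-to-front, then reversed into index order (length n + 1).
--     suffix = [n]
--     for i, nm in reversed(list(enumerate(names))):
--         suffix.append(i if nm in EXITS else suffix[-1])
--     suffix.reverse()
--     for i in range(n):
--         if (names[i] in ("LT", "GT", "EQ", "ISZERO") and i + 1 < n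
--                 and names[i + 1] == "JUMPI"
--                 and suffix[i + 2] < min(i + 20, n)):
--             return True
--         if (i + 5 < n and names[i].startswith("PUSH")
--                 and names[i + 1] in ("ADD", "SUB")
--                 and names[i + 2] in ("LT", "GT", "EQ")
--                 and names[i + 3] == "JUMPI"):
--             return True
--     return False
-- ===== Notes on version B (the rewrite author's own statement) =====
-- stated objective: alternative
-- what changed: B precomputes a next-exit suffix table (smallest exit-opcode index >= j for every j) in one backward pass, so the comparison->JUMPI check becomes a constant-time table lookup instead of A's 20-wide inner rescan, and both patterns are decided in one forward scan.
-- outside the precondition, e.g. on _has_termination_condition([{'name': 'LT'}, {'name': 'JUMPI'}, {'name': 'STOP'}, {}]): A returns True, B raises KeyError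
import Mathlib
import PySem

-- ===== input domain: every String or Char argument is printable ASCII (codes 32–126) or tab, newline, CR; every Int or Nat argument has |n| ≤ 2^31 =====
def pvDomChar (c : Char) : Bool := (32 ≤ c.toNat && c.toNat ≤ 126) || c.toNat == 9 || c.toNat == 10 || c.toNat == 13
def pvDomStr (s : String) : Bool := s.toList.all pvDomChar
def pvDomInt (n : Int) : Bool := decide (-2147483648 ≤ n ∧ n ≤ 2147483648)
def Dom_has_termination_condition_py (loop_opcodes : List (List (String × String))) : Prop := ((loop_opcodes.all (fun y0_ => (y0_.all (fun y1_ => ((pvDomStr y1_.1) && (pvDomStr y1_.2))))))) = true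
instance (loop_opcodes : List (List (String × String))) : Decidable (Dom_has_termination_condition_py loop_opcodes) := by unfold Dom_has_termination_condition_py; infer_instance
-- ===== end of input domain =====

-- B precomputes a next-exit suffix table in a backward pass, replacing A's 20-wide inner
-- rescan by a table lookup; objective: alternative. Equivalence of return values.

-- ===== PORT A =====
-- op["name"] : first-match lookup; "" only where Python raises KeyError (excluded by Pre_)
def pvOpName (d : List (String × String)) : String :=
  PySem.Dict.getD (PySem.Dict.mk d) "name" ""

-- loop_opcodes[i]["name"] (indices used by A are always in range where accessed)
def pvNmAt (xs : List (List (String × String))) (i : Nat) : String :=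
  pvOpName (xs.getD i [])

-- inner 'for j in range(i+2, min(i+20, len))' scan for an exit opcode
def pvAInner (xs : List (List (String × String))) (j stop : Nat) : Bool :=
  if _h : j < stop then
    if ["RETURN", "STOP", "REVERT"].contains (pvNmAt xs j) then true
    else pvAInner xs (j + 1) stop
  else false
termination_by stop - j

-- first loop: comparison -> JUMPI -> exit-within-20 pattern
def pvALoop1 (xs : List (List (String × String))) (i : Nat) : Bool :=
  if _h : i < xs.length then
    if ["LT", "GT", "EQ", "ISZERO"].contains (pvNmAt xs i) then
      if decide (i + 1 < xs.length) && (pvNmAt xs (i + 1) == "JUMPI") then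
        if pvAInner xs (i + 2) (min (i + 20) xs.length) then true
        else pvALoop1 xs (i + 1)
      else pvALoop1 xs (i + 1)
    else pvALoop1 xs (i + 1)
  else false
termination_by xs.length - i

-- second loop: 'for i in range(len - 5)' counter-based pattern
def pvALoop2 (xs : List (List (String × String))) (i : Nat) : Bool :=
  if _h : i + 5 < xs.length then
    if PySem.Str.startswith (pvNmAt xs i) "PUSH"
        && ["ADD", "SUB"].contains (pvNmAt xs (i + 1))
        && ["LT", "GT", "EQ"].contains (pvNmAt xs (i + 2))
        && (pvNmAt xs (i + 3) == "JUMPI") then true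
    else pvALoop2 xs (i + 1)
  else false
termination_by xs.length - i

def has_termination_condition_py (loop_opcodes : List (List (String × String))) : Bool :=
  if pvALoop1 loop_opcodes 0 then true else pvALoop2 loop_opcodes 0

-- ===== PORT B =====
-- nm in EXITS
def pvExit (s : String) : Bool := ["RETURN", "STOP", "REVERT"].contains s

-- Source B's suffix table: suffix[j] = smallest index k >= j with an exit opcode, else n;
-- built back-to-front over reversed(list(enumerate(names))), then reversed.
def pvSuffix (ns : List String) : List Int :=
  let n : Int := (ns.length : Int)
  (((PySem.List.enumerate ns 0).reverse.foldl
      (fun acc p => acc ++ [if pvExit p.2 then p.1 else acc.getLastD n]) [n])).reverse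

-- Source B's first per-index test (comparison -> JUMPI -> suffix lookup)
def pvBP1 (ns : List String) (suffix : List Int) (i : Nat) : Bool :=
  ["LT", "GT", "EQ", "ISZERO"].contains (ns.getD i "")
    && decide (i + 1 < ns.length)
    && (ns.getD (i + 1) "" == "JUMPI")
    && decide (suffix.getD (i + 2) (ns.length : Int) < min ((i : Int) + 20) (ns.length : Int))

-- Source B's second per-index test (counter-based pattern)
def pvBP2 (ns : List String) (i : Nat) : Bool :=
  decide (i + 5 < ns.length)
    && PySem.Str.startswith (ns.getD i "") "PUSH"
    && ["ADD", "SUB"].contains (ns.getD (i + 1) "")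
    && ["LT", "GT", "EQ"].contains (ns.getD (i + 2) "")
    && (ns.getD (i + 3) "" == "JUMPI")

def has_termination_condition_py_alt (loop_opcodes : List (List (String × String))) : Bool :=
  let ns := loop_opcodes.map pvOpName
  let suffix := pvSuffix ns
  (List.range ns.length).any (fun i => pvBP1 ns suffix i || pvBP2 ns i)

-- ===== PRECONDITION & SPEC =====
-- Pre_ excludes inputs where some opcode dict lacks a "name" key: there Python A raises
-- KeyError on the first such dict it inspects (or, if it returns early, B raises instead).
def Pre_has_termination_condition_py (loop_opcodes : List (List (String × String))) : Prop :=
  ∀ d ∈ loop_opcodes, ((PySem.Dict.mk d).contains "name") = true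
instance (loop_opcodes : List (List (String × String))) : Decidable (Pre_has_termination_condition_py loop_opcodes) := by unfold Pre_has_termination_condition_py; infer_instance

def pvWitness_has_termination_condition_py : (List (List (String × String))) :=
  [[("name", "LT")], [("name", "JUMPI")], [("name", "STOP")]]

def Spec_has_termination_condition_py (loop_opcodes : List (List (String × String))) (out : Bool) : Prop := out = has_termination_condition_py_alt loop_opcodes
instance (loop_opcodes : List (List (String × String))) (out : Bool) : Decidable (Spec_has_termination_condition_py loop_opcodes out) := by unfold Spec_has_termination_condition_py; infer_instance

-- ===== CLAIM (what is proved, stated in full; the proofs are below) =====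
def Claim_equal_has_termination_condition_py : Prop := ∀ (loop_opcodes : List (List (String × String))), Dom_has_termination_condition_py loop_opcodes → Pre_has_termination_condition_py loop_opcodes → Spec_has_termination_condition_py loop_opcodes (has_termination_condition_py loop_opcodes)

-- ===== LEMMAS AND PROOFS =====

-- clean recursive form of the suffix table (proof helper only)
def pvNEAux (n : Int) : List String → Int → List Int
  | [], _ => [n]
  | a :: l, o => (if pvExit a then o else (pvNEAux n l (o + 1)).headD n) :: pvNEAux n l (o + 1)

theorem pvNEAux_headD (n : Int) (l : List String) (o : Int) :
    (pvNEAux n l o).headD n = (pvNEAux n l o).getD 0 n := by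
  cases l <;> simp [pvNEAux]

theorem pvFoldr_enum_eq (n : Int) :
    ∀ (l : List String) (o : Int),
      (PySem.List.enumerate l o).foldr
          (fun p acc => acc ++ [if pvExit p.2 then p.1 else acc.getLastD n]) [n]
        = (pvNEAux n l o).reverse := by
  intro l
  induction l with
  | nil => intro o; simp [PySem.List.enumerate_nil, pvNEAux]
  | cons a t ih =>
    intro o
    rw [PySem.List.enumerate_cons]
    simp only [List.foldr_cons]
    rw [ih (o + 1)]
    simp [pvNEAux, List.getLastD_eq_getLast?, List.getLast?_reverse]

theorem pvSuffix_eq (ns : List String) : pvSuffix ns = pvNEAux (ns.length : Int) ns 0 := by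
  show (((PySem.List.enumerate ns 0).reverse.foldl
      (fun acc p => acc ++ [if pvExit p.2 then p.1 else acc.getLastD (ns.length : Int)])
      [(ns.length : Int)])).reverse = _
  rw [List.foldl_reverse, pvFoldr_enum_eq, List.reverse_reverse]

theorem pvNEAux_lt (n m : Int) (hm : m ≤ n) :
    ∀ (l : List String) (o : Int) (j : Nat), o + l.length = n →
      ((pvNEAux n l o).getD j n < m
        ↔ ∃ k : Nat, j ≤ k ∧ k < l.length ∧ o + k < m ∧ pvExit (l.getD k "") = true) := by
  intro l
  induction l with
  | nil =>
    intro o j _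
    constructor
    · intro h
      cases j <;> simp [pvNEAux] at h <;> omega
    · rintro ⟨k, _, hk, _, _⟩; simp at hk
  | cons a t ih =>
    intro o j hlen
    have hlen' : (o + 1) + (t.length : Int) = n := by
      simp at hlen; omega
    cases j with
    | zero =>
      by_cases he : pvExit a = true
      · simp only [pvNEAux, he, if_pos, List.getD_cons_zero]
        constructor
        · intro h; exact ⟨0, le_refl 0, by simp, by simpa using h, by simpa using he⟩
        · rintro ⟨k, _, _, hkm, _⟩
          have : (0 : Int) ≤ (k : Int) := by positivity
          omega
      · have he' : pvExit a = false := by simpa using he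
        simp only [pvNEAux, he', if_neg, Bool.false_eq_true, not_false_iff, List.getD_cons_zero]
        rw [pvNEAux_headD, ih (o + 1) 0 hlen']
        constructor
        · rintro ⟨k, _, hk1, hk2, hk3⟩
          refine ⟨k + 1, by omega, by simpa using Nat.succ_lt_succ hk1, by push_cast; omega, by simpa using hk3⟩
        · rintro ⟨k, _, hk1, hk2, hk3⟩
          cases k with
          | zero => simp [he'] at hk3
          | succ k' =>
            exact ⟨k', by omega, by simpa using Nat.lt_of_succ_lt_succ hk1,
              by push_cast at hk2 ⊢; omega, by simpa using hk3⟩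
    | succ j' =>
      simp only [pvNEAux, List.getD_cons_succ]
      rw [ih (o + 1) j' hlen']
      constructor
      · rintro ⟨k, hk0, hk1, hk2, hk3⟩
        exact ⟨k + 1, by omega, by simpa using Nat.succ_lt_succ hk1, by push_cast; omega,
          by simpa using hk3⟩
      · rintro ⟨k, hk0, hk1, hk2, hk3⟩
        cases k with
        | zero => omega
        | succ k' =>
          exact ⟨k', by omega, by simpa using Nat.lt_of_succ_lt_succ hk1,
            by push_cast at hk2 ⊢; omega, by simpa using hk3⟩

theorem pvNm_eq (xs : List (List (String × String))) (k : Nat) :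
    (xs.map pvOpName).getD k "" = pvNmAt xs k := by
  unfold pvNmAt
  simp only [List.getD, List.getElem?_map]
  cases h : xs[k]? <;> simp [pvOpName, PySem.Dict.getD, PySem.Dict.get?]

theorem pvAInner_iff (xs : List (List (String × String))) :
    ∀ (d j stop : Nat), stop - j ≤ d →
      (pvAInner xs j stop = true
        ↔ ∃ k, j ≤ k ∧ k < stop ∧ pvExit (pvNmAt xs k) = true) := by
  intro d
  induction d with
  | zero =>
    intro j stop hd
    rw [pvAInner, dif_neg (by omega)]
    simp only [Bool.false_eq_true, false_iff]
    rintro ⟨k, h1, h2, _⟩; omega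
  | succ d ih =>
    intro j stop hd
    rw [pvAInner]
    by_cases h : j < stop
    · rw [dif_pos h]
      by_cases hc : pvExit (pvNmAt xs j) = true
      · rw [if_pos (by simpa [pvExit] using hc)]
        simp only [true_iff]
        exact ⟨j, le_refl j, h, hc⟩
      · rw [if_neg (by simpa [pvExit] using hc)]
        rw [ih (j + 1) stop (by omega)]
        constructor
        · rintro ⟨k, h1, h2, h3⟩; exact ⟨k, by omega, h2, h3⟩
        · rintro ⟨k, h1, h2, h3⟩
          rcases Nat.eq_or_lt_of_le h1 with rfl | hlt
          · exact absurd h3 hc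
          · exact ⟨k, hlt, h2, h3⟩
    · rw [dif_neg h]
      simp only [Bool.false_eq_true, false_iff]
      rintro ⟨k, h1, h2, _⟩; omega

-- B's suffix-table lookup decides exactly A's inner window scan
theorem pvBP1_char (xs : List (List (String × String))) (i : Nat) (hi : i + 1 < xs.length) :
    decide ((pvSuffix (xs.map pvOpName)).getD (i + 2) ((xs.map pvOpName).length : Int)
        < min ((i : Int) + 20) ((xs.map pvOpName).length : Int))
      = pvAInner xs (i + 2) (min (i + 20) xs.length) := by
  rw [Bool.eq_iff_iff, decide_eq_true_iff,
    pvAInner_iff xs (min (i + 20) xs.length) (i + 2) (min (i + 20) xs.length) (by omega)]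
  have hlen : (xs.map pvOpName).length = xs.length := by simp
  rw [pvSuffix_eq, hlen,
    pvNEAux_lt ((xs.length : Nat) : Int) (min ((i : Int) + 20) ((xs.length : Nat) : Int))
      (by omega) (xs.map pvOpName) 0 (i + 2) (by simp)]
  constructor
  · rintro ⟨k, h0, h1, h2, h3⟩
    rw [hlen] at h1
    refine ⟨k, h0, by omega, ?_⟩
    rw [pvNm_eq] at h3; exact h3
  · rintro ⟨k, h0, h1, h2⟩
    refine ⟨k, h0, by rw [hlen]; omega, by omega, ?_⟩
    rw [pvNm_eq]; exact h2

theorem pvBP1_big_false (xs : List (List (String × String))) (s : List Int) (k : Nat)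
    (h : ¬ k < xs.length) : pvBP1 (xs.map pvOpName) s k = false := by
  unfold pvBP1
  have h2 : ¬ (k + 1 < xs.length) := by omega
  simp [List.length_map, h2]

theorem pvBP2_big_false (xs : List (List (String × String))) (k : Nat)
    (h : ¬ k < xs.length) : pvBP2 (xs.map pvOpName) k = false := by
  unfold pvBP2
  have h2 : ¬ (k + 5 < xs.length) := by omega
  simp [List.length_map, h2]

-- A's first-loop body at an in-range i decides exactly pvBP1
theorem pvBP1_eq (xs : List (List (String × String))) (i : Nat) :
    pvBP1 (xs.map pvOpName) (pvSuffix (xs.map pvOpName)) i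
      = (["LT", "GT", "EQ", "ISZERO"].contains (pvNmAt xs i)
          && (decide (i + 1 < xs.length) && (pvNmAt xs (i + 1) == "JUMPI"))
          && pvAInner xs (i + 2) (min (i + 20) xs.length)) := by
  unfold pvBP1
  rw [pvNm_eq, pvNm_eq]
  have hlen : (xs.map pvOpName).length = xs.length := by simp
  by_cases hi : i + 1 < xs.length
  · rw [pvBP1_char xs i hi, hlen]
    ac_rfl
  · simp [hi]

theorem pvBP2_char (xs : List (List (String × String))) (i : Nat) :
    pvBP2 (xs.map pvOpName) i
      = (decide (i + 5 < xs.length)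
          && (PySem.Str.startswith (pvNmAt xs i) "PUSH"
              && ["ADD", "SUB"].contains (pvNmAt xs (i + 1))
              && ["LT", "GT", "EQ"].contains (pvNmAt xs (i + 2))
              && (pvNmAt xs (i + 3) == "JUMPI"))) := by
  unfold pvBP2
  rw [pvNm_eq, pvNm_eq, pvNm_eq, pvNm_eq]
  have hlen : (xs.map pvOpName).length = xs.length := by simp
  rw [hlen]
  ac_rfl

theorem pvLoop1_iff_aux (xs : List (List (String × String))) :
    ∀ (d i : Nat), xs.length - i ≤ d →
      (pvALoop1 xs i = true
        ↔ ∃ k, i ≤ k ∧ pvBP1 (xs.map pvOpName) (pvSuffix (xs.map pvOpName)) k = true) := by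
  intro d
  induction d with
  | zero =>
    intro i hd
    have hi : ¬ i < xs.length := by omega
    rw [pvALoop1, dif_neg hi]
    constructor
    · intro h; exact absurd h (by simp)
    · rintro ⟨k, hk1, hk2⟩
      rw [pvBP1_big_false xs _ k (by omega)] at hk2
      exact absurd hk2 (by simp)
  | succ d ih =>
    intro i hd
    rw [pvALoop1]
    by_cases hi : i < xs.length
    · rw [dif_pos hi]
      have hstep := pvBP1_eq xs i
      have hrec := ih (i + 1) (by omega)
      constructor
      · intro h
        by_cases c1 : ["LT", "GT", "EQ", "ISZERO"].contains (pvNmAt xs i) = true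
        · rw [if_pos c1] at h
          by_cases c2 : (decide (i + 1 < xs.length) && (pvNmAt xs (i + 1) == "JUMPI")) = true
          · rw [if_pos c2] at h
            by_cases c3 : pvAInner xs (i + 2) (min (i + 20) xs.length) = true
            · exact ⟨i, le_refl i, by rw [hstep, c1, c2, c3]; rfl⟩
            · rw [if_neg c3] at h
              obtain ⟨k, hk1, hk2⟩ := hrec.mp (by simpa [c3] using h)
              exact ⟨k, by omega, hk2⟩
          · rw [if_neg c2] at h
            obtain ⟨k, hk1, hk2⟩ := hrec.mp h
            exact ⟨k, by omega, hk2⟩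
        · rw [if_neg c1] at h
          obtain ⟨k, hk1, hk2⟩ := hrec.mp h
          exact ⟨k, by omega, hk2⟩
      · rintro ⟨k, hk1, hk2⟩
        by_cases hki : k = i
        · subst hki
          rw [hstep] at hk2
          have c1 := (Bool.and_eq_true _ _).mp hk2
          have c3 := c1.2
          have c12 := (Bool.and_eq_true _ _).mp c1.1
          rw [if_pos c12.1, if_pos c12.2, if_pos c3]
        · have hnext : pvALoop1 xs (i + 1) = true := hrec.mpr ⟨k, by omega, hk2⟩
          split_ifs <;> simp_all
    · rw [dif_neg hi]
      constructor
      · intro h; exact absurd h (by simp)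
      · rintro ⟨k, hk1, hk2⟩
        rw [pvBP1_big_false xs _ k (by omega)] at hk2
        exact absurd hk2 (by simp)

theorem pvLoop2_iff_aux (xs : List (List (String × String))) :
    ∀ (d i : Nat), xs.length - i ≤ d →
      (pvALoop2 xs i = true ↔ ∃ k, i ≤ k ∧ pvBP2 (xs.map pvOpName) k = true) := by
  intro d
  induction d with
  | zero =>
    intro i hd
    have hi : ¬ i + 5 < xs.length := by omega
    rw [pvALoop2, dif_neg hi]
    constructor
    · intro h; exact absurd h (by simp)
    · rintro ⟨k, hk1, hk2⟩
      rw [pvBP2_char] at hk2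
      have hk5 : ¬ k + 5 < xs.length := by omega
      simp [hk5] at hk2
  | succ d ih =>
    intro i hd
    rw [pvALoop2]
    by_cases hi : i + 5 < xs.length
    · rw [dif_pos hi]
      have hstep := pvBP2_char xs i
      have hrec := ih (i + 1) (by omega)
      constructor
      · intro h
        by_cases c : (PySem.Str.startswith (pvNmAt xs i) "PUSH"
            && ["ADD", "SUB"].contains (pvNmAt xs (i + 1))
            && ["LT", "GT", "EQ"].contains (pvNmAt xs (i + 2))
            && (pvNmAt xs (i + 3) == "JUMPI")) = true
        · exact ⟨i, le_refl i, by rw [hstep, c]; simp [hi]⟩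
        · rw [if_neg c] at h
          obtain ⟨k, hk1, hk2⟩ := hrec.mp h
          exact ⟨k, by omega, hk2⟩
      · rintro ⟨k, hk1, hk2⟩
        by_cases hki : k = i
        · subst hki
          rw [hstep] at hk2
          have hc := (Bool.and_eq_true _ _).mp hk2
          rw [if_pos hc.2]
        · have hnext : pvALoop2 xs (i + 1) = true := hrec.mpr ⟨k, by omega, hk2⟩
          split_ifs <;> simp_all
    · rw [dif_neg hi]
      constructor
      · intro h; exact absurd h (by simp)
      · rintro ⟨k, hk1, hk2⟩
        rw [pvBP2_char] at hk2
        have hk5 : ¬ k + 5 < xs.length := by omega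
        simp [hk5] at hk2

theorem pvAlt_iff (xs : List (List (String × String))) :
    has_termination_condition_py_alt xs = true
      ↔ ∃ k, (pvBP1 (xs.map pvOpName) (pvSuffix (xs.map pvOpName)) k
              || pvBP2 (xs.map pvOpName) k) = true := by
  unfold has_termination_condition_py_alt
  simp only [List.any_eq_true, List.mem_range]
  constructor
  · rintro ⟨k, _, hk⟩; exact ⟨k, hk⟩
  · rintro ⟨k, hk⟩
    refine ⟨k, ?_, hk⟩
    by_contra hbig
    have hk2 : ¬ k < xs.length := by simpa using hbig
    rw [pvBP1_big_false xs _ k hk2, pvBP2_big_false xs k hk2] at hk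
    exact absurd hk (by simp)

-- ===== VERDICT (by name: the statement is the Claim_ definition above) =====
theorem has_termination_condition_py_spec : Claim_equal_has_termination_condition_py := by
  intro xs _hdom _hpre
  unfold Spec_has_termination_condition_py
  rw [Bool.eq_iff_iff]
  unfold has_termination_condition_py
  constructor
  · intro h
    split_ifs at h with h1
    · obtain ⟨k, _, hk⟩ := (pvLoop1_iff_aux xs xs.length 0 (by omega)).mp h1
      exact (pvAlt_iff xs).mpr ⟨k, by simp [hk]⟩
    · obtain ⟨k, _, hk⟩ := (pvLoop2_iff_aux xs xs.length 0 (by omega)).mp h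
      exact (pvAlt_iff xs).mpr ⟨k, by simp [hk]⟩
  · intro h
    obtain ⟨k, hk⟩ := (pvAlt_iff xs).mp h
    rcases (Bool.or_eq_true _ _).mp hk with h1 | h2
    · have hl1 : pvALoop1 xs 0 = true :=
        (pvLoop1_iff_aux xs xs.length 0 (by omega)).mpr ⟨k, Nat.zero_le k, h1⟩
      simp [hl1]
    · have hl2 : pvALoop2 xs 0 = true :=
        (pvLoop2_iff_aux xs xs.length 0 (by omega)).mpr ⟨k, Nat.zero_le k, h2⟩
      split_ifs <;> simp_all
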